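-- pv_equiv track=rewrite | github.com/Suyog1407/IPO-ForeSight | src/plagiarism_detector.py | _generate_plagiarism_recommendations
-- ===== SOURCE A (Python) =====
-- from typing import Dict, List, Any, Tuple, Optional
--
-- def _generate_plagiarism_recommendations(plagiarism_cases: List[Dict]) -> List[str]:
--     """
--     Generate recommendations based on plagiarism cases
--     """
--     recommendations = []
--
--     high_severity_cases = [c for c in plagiarism_cases if c.get('severity') == 'high']
--     if high_severity_cases:
--         recommendations.append(f"Address {len(high_severity_cases)} high-severity plagiarism cases immediately")
--
--     internal_cases = [c for c in plagiarism_cases if c.get('type') == 'internal_plagiarism']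
--     if internal_cases:
--         recommendations.append("Review document for redundant content across sections")
--
--     external_cases = [c for c in plagiarism_cases if c.get('type') == 'external_plagiarism']
--     if external_cases:
--         recommendations.append("Verify originality of content and add proper citations")
--
--     boilerplate_cases = [c for c in plagiarism_cases if c.get('type') == 'boilerplate_content']
--     if boilerplate_cases:
--         recommendations.append("Customize boilerplate content to be more company-specific")
--
--     template_cases = [c for c in plagiarism_cases if c.get('type') == 'template_content']
--     if template_cases:
--         recommendations.append("Replace all template placeholders with actual content")
--
--     return recommendations
-- ===== SOURCE B (Python) =====
-- def _generate_plagiarism_recommendations(plagiarism_cases):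
--     high_count = 0
--     types = set()
--     for c in plagiarism_cases:
--         if c.get('severity') == 'high':
--             high_count += 1
--         t = c.get('type')
--         if t is not None:
--             types.add(t)
--     recommendations = []
--     if high_count:
--         recommendations.append(f"Address {high_count} high-severity plagiarism cases immediately")
--     if 'internal_plagiarism' in types:
--         recommendations.append("Review document for redundant content across sections")
--     if 'external_plagiarism' in types:
--         recommendations.append("Verify originality of content and add proper citations")
--     if 'boilerplate_content' in types:
--         recommendations.append("Customize boilerplate content to be more company-specific")
--     if 'template_content' in types:
--         recommendations.append("Replace all template placeholders with actual content")
--     return recommendations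
-- ===== Notes on version B (the rewrite author's own statement) =====
-- stated objective: simpler
-- what changed: Replaces five separate list-comprehension scans over plagiarism_cases with one pass that accumulates the high-severity count and a set of case types, then emits the same fixed sequence of messages from that aggregate.
import Mathlib
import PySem

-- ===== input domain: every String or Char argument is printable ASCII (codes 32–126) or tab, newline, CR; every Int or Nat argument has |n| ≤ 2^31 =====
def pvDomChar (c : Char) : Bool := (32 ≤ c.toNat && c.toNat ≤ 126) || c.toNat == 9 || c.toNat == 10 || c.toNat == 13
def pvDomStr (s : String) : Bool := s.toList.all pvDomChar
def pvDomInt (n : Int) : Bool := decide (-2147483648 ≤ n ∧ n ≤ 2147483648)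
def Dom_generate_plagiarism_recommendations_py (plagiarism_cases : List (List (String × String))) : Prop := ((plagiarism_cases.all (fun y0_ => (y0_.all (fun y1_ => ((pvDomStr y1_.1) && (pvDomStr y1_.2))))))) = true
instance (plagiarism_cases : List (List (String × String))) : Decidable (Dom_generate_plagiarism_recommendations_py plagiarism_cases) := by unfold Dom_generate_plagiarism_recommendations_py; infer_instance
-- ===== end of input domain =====

-- B replaces A's five separate scans over the case list by one accumulating pass; return value only, no side effects.

-- ===== PORT A =====
-- c.get(k) on a dict represented as an association list
def pvCGet (c : List (String × String)) (k : String) : Option String :=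
  (PySem.Dict.mk c).get? k

def generate_plagiarism_recommendations_py (plagiarism_cases : List (List (String × String))) : List String :=
  let recommendations : List String := []
  let high_severity_cases := plagiarism_cases.filter (fun c => pvCGet c "severity" == some "high")
  let recommendations := if high_severity_cases ≠ [] then
      recommendations ++ ["Address " ++ PySem.Int.toStr (high_severity_cases.length : Int) ++ " high-severity plagiarism cases immediately"]
    else recommendations
  let internal_cases := plagiarism_cases.filter (fun c => pvCGet c "type" == some "internal_plagiarism")
  let recommendations := if internal_cases ≠ [] then
      recommendations ++ ["Review document for redundant content across sections"] else recommendations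
  let external_cases := plagiarism_cases.filter (fun c => pvCGet c "type" == some "external_plagiarism")
  let recommendations := if external_cases ≠ [] then
      recommendations ++ ["Verify originality of content and add proper citations"] else recommendations
  let boilerplate_cases := plagiarism_cases.filter (fun c => pvCGet c "type" == some "boilerplate_content")
  let recommendations := if boilerplate_cases ≠ [] then
      recommendations ++ ["Customize boilerplate content to be more company-specific"] else recommendations
  let template_cases := plagiarism_cases.filter (fun c => pvCGet c "type" == some "template_content")
  let recommendations := if template_cases ≠ [] then
      recommendations ++ ["Replace all template placeholders with actual content"] else recommendations
  recommendations

-- ===== PORT B =====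
-- loop body of B's single pass: count high-severity cases, collect the set of 'type' values
def pvStep (st : Int × PySem.Set String) (c : List (String × String)) : Int × PySem.Set String :=
  let st := if pvCGet c "severity" == some "high" then (st.1 + 1, st.2) else st
  match pvCGet c "type" with
  | some t => (st.1, PySem.Set.add st.2 t)
  | none => st

def generate_plagiarism_recommendations_py_alt (plagiarism_cases : List (List (String × String))) : List String :=
  let st := plagiarism_cases.foldl pvStep (0, PySem.Set.empty)
  let high_count := st.1
  let types := st.2
  let recommendations : List String := []
  let recommendations := if high_count ≠ 0 then
      recommendations ++ ["Address " ++ PySem.Int.toStr high_count ++ " high-severity plagiarism cases immediately"]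
    else recommendations
  let recommendations := if PySem.Set.contains types "internal_plagiarism" then
      recommendations ++ ["Review document for redundant content across sections"] else recommendations
  let recommendations := if PySem.Set.contains types "external_plagiarism" then
      recommendations ++ ["Verify originality of content and add proper citations"] else recommendations
  let recommendations := if PySem.Set.contains types "boilerplate_content" then
      recommendations ++ ["Customize boilerplate content to be more company-specific"] else recommendations
  let recommendations := if PySem.Set.contains types "template_content" then
      recommendations ++ ["Replace all template placeholders with actual content"] else recommendations
  recommendations

-- ===== PRECONDITION & SPEC =====
def Spec_generate_plagiarism_recommendations_py (plagiarism_cases : List (List (String × String))) (out : List String) : Prop := out = generate_plagiarism_recommendations_py_alt plagiarism_cases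
instance (plagiarism_cases : List (List (String × String))) (out : List String) : Decidable (Spec_generate_plagiarism_recommendations_py plagiarism_cases out) := by unfold Spec_generate_plagiarism_recommendations_py; infer_instance

-- ===== CLAIM (what is proved, stated in full; the proofs are below) =====
def Claim_equal_generate_plagiarism_recommendations_py : Prop := ∀ (plagiarism_cases : List (List (String × String))), Dom_generate_plagiarism_recommendations_py plagiarism_cases → Spec_generate_plagiarism_recommendations_py plagiarism_cases (generate_plagiarism_recommendations_py plagiarism_cases)

-- ===== LEMMAS AND PROOFS =====

-- the fold's first component counts exactly the high-severity cases
theorem pv_fold_fst (l : List (List (String × String))) (n : Int) (s : PySem.Set String) :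
    (l.foldl pvStep (n, s)).1 = n + ((l.filter (fun c => pvCGet c "severity" == some "high")).length : Int) := by
  induction l generalizing n s with
  | nil => simp
  | cons c l ih =>
    simp only [List.foldl_cons, List.filter_cons, pvStep]
    by_cases hs : (pvCGet c "severity" == some "high") = true <;>
      cases ht : pvCGet c "type" <;>
      simp [hs, ih] <;> ring

-- the fold's second component contains t iff some case has type t (or it was there already)
theorem pv_fold_snd (l : List (List (String × String))) (n : Int) (s : PySem.Set String) (t : String) :
    (t ∈ (l.foldl pvStep (n, s)).2) ↔ (t ∈ s ∨ ∃ c ∈ l, pvCGet c "type" = some t) := by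
  induction l generalizing n s with
  | nil => simp
  | cons c l ih =>
    simp only [List.foldl_cons, pvStep]
    by_cases hs : (pvCGet c "severity" == some "high") = true <;>
      cases ht : pvCGet c "type" <;>
      simp [hs, ih, PySem.Set.mem_add, eq_comm] <;> aesop

theorem pv_contains_fold (l : List (List (String × String))) (t : String) :
    (PySem.Set.contains ((l.foldl pvStep (0, PySem.Set.empty)).2) t = true)
      ↔ (l.filter (fun c => pvCGet c "type" == some t) ≠ []) := by
  rw [PySem.Set.contains_iff, pv_fold_snd]
  simp only [PySem.Set.empty, List.not_mem_nil, false_or, ne_eq, List.filter_eq_nil_iff,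
    beq_iff_eq, not_forall]
  constructor
  · rintro ⟨c, hc, h⟩; exact ⟨c, hc, by simp [h]⟩
  · rintro ⟨c, hc, h⟩; exact ⟨c, hc, by simpa using h⟩

-- ===== VERDICT (by name: the statement is the Claim_ definition above) =====
theorem generate_plagiarism_recommendations_py_spec : Claim_equal_generate_plagiarism_recommendations_py := by
  intro l _
  unfold Spec_generate_plagiarism_recommendations_py
  unfold generate_plagiarism_recommendations_py generate_plagiarism_recommendations_py_alt
  simp only [pv_fold_fst, pv_contains_fold, zero_add, ne_eq, Int.natCast_eq_zero,
    List.length_eq_zero_iff, List.nil_append]
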